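-- pv_equiv track=rewrite | github.com/William-A-Wang/PRISM | Main/Cal_V13.py | find_all_complementary_primers
-- ===== SOURCE A (Python) =====
-- def is_complementary(seq1, seq2):
--     return (seq1 == "A" and seq2 == "T") or \
--            (seq1 == "T" and seq2 == "A") or \
--            (seq1 == "C" and seq2 == "G") or \
--            (seq1 == "G" and seq2 == "C")
--
-- def find_all_complementary_primers(primer1, primer2, min_len=4):
--     m, n = len(primer1), len(primer2)
--     dp = [[0] * (n+1) for _ in range(m+1)]
--     results = []
--
--     for i in range(1, m+1):
--         for j in range(1, n+1):
--             if is_complementary(primer1[i-1], primer2[j-1]):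
--                 dp[i][j] = dp[i-1][j-1] + 1
--                 if dp[i][j] >= min_len:
--                     start_position_primer1 = i - dp[i][j]
--                     end_position_primer1 = i
--                     start_position_primer2 = j - dp[i][j]
--                     end_position_primer2 = j
--                     results.append({
--                         "Primer1_start": start_position_primer1,
--                         "Primer1_end": end_position_primer1,
--                         "Primer2_start": start_position_primer2,
--                         "Primer2_end": end_position_primer2,
--                         "Length": dp[i][j]
--                     })
--             else:
--                 dp[i][j] = 0
--
--     results.sort(key=lambda x: (x['Primer1_start'], -x['Length']))
--
--     filtered_results = []
--     for i, result in enumerate(results):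
--         is_subset = False
--         for j in range(i):
--             if (results[j]['Primer1_start'] <= result['Primer1_start'] and
--                 results[j]['Primer1_end'] >= result['Primer1_end'] and
--                 results[j]['Primer2_start'] <= result['Primer2_start'] and
--                 results[j]['Primer2_end'] >= result['Primer2_end']):
--                 is_subset = True
--                 break
--         if not is_subset:
--             filtered_results.append(result)
--
--     return filtered_results
-- ===== SOURCE B (Python) =====
-- # B: walk each anti-subset diagonal once, record only the maximal complementary
-- # run per diagonal segment, then sort and keep the containment-maximal entries.
-- COMPLEMENT = {"A": "T", "T": "A", "C": "G", "G": "C"}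
--
--
-- def _entry(end1, end2, length):
--     return {
--         "Primer1_start": end1 - length,
--         "Primer1_end": end1,
--         "Primer2_start": end2 - length,
--         "Primer2_end": end2,
--         "Length": length,
--     }
--
--
-- def _contains(q, r):
--     return (q["Primer1_start"] <= r["Primer1_start"] and
--             q["Primer1_end"] >= r["Primer1_end"] and
--             q["Primer2_start"] <= r["Primer2_start"] and
--             q["Primer2_end"] >= r["Primer2_end"])
--
--
-- def find_all_complementary_primers(primer1, primer2, min_len=4):
--     m, n = len(primer1), len(primer2)
--     candidates = []
--     # diagonals, from the bottom-left corner of the grid to the top-right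
--     starts = [(i, 0) for i in range(m - 1, -1, -1)] + [(0, j) for j in range(1, n)]
--     for i0, j0 in starts:
--         run = 0
--         i, j = i0, j0
--         while i < m and j < n:
--             if COMPLEMENT.get(primer1[i]) == primer2[j]:
--                 run += 1
--             else:
--                 if run > 0 and run >= min_len:
--                     candidates.append(_entry(i, j, run))
--                 run = 0
--             i += 1
--             j += 1
--         if run > 0 and run >= min_len:
--             candidates.append(_entry(i, j, run))
--     candidates.sort(key=lambda r: (r["Primer1_start"], -r["Length"]))
--     return [r for r in candidates
--             if not any(q != r and _contains(q, r) for q in candidates)]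
-- ===== Notes on version B (the rewrite author's own statement) =====
-- stated objective: faster
-- what changed: Instead of filling an (m+1)x(n+1) DP table and recording every prefix of every complementary run (then sorting and subset-filtering the whole quadratic-sized candidate list), B walks each diagonal once, emits a single entry per maximal complementary run, and sorts/filters only those; A's non-maximal entries are provably discarded by its own subset filter, so the outputs coincide exactly.
import Mathlib
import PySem

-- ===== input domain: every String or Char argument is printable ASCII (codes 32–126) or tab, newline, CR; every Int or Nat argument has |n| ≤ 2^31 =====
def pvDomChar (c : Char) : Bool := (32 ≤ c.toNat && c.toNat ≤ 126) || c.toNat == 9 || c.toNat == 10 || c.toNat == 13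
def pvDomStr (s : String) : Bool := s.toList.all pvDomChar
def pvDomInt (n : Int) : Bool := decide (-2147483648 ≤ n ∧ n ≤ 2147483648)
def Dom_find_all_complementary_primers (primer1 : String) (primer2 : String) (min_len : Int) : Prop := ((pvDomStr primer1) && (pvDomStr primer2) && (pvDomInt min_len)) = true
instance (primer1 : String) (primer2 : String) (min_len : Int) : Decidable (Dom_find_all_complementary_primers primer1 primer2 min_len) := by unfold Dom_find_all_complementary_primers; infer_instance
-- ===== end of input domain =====

-- B replaces A's full DP table + quadratic candidate list by one pass per diagonal
-- that records only the maximal run entries; same return value, proved below.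
-- ===== PORT A =====
def isComplementary (seq1 : Char) (seq2 : Char) : Bool :=
  (seq1 == 'A' && seq2 == 'T') ||
  (seq1 == 'T' && seq2 == 'A') ||
  (seq1 == 'C' && seq2 == 'G') ||
  (seq1 == 'G' && seq2 == 'C')

def subsetOfA (q : List (String × Int)) (r : List (String × Int)) : Bool :=
  decide (PySem.Dict.getD ⟨q⟩ "Primer1_start" 0 ≤ PySem.Dict.getD ⟨r⟩ "Primer1_start" 0) &&
  decide (PySem.Dict.getD ⟨q⟩ "Primer1_end" 0 ≥ PySem.Dict.getD ⟨r⟩ "Primer1_end" 0) &&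
  decide (PySem.Dict.getD ⟨q⟩ "Primer2_start" 0 ≤ PySem.Dict.getD ⟨r⟩ "Primer2_start" 0) &&
  decide (PySem.Dict.getD ⟨q⟩ "Primer2_end" 0 ≥ PySem.Dict.getD ⟨r⟩ "Primer2_end" 0)

-- A's final loop: scan the sorted list, keeping each entry not contained in an earlier one.
def filterLoopA : List (List (String × Int)) → List (List (String × Int)) → List (List (String × Int))
  | [], _ => []
  | r :: rest, prev =>
      if prev.any (fun q => subsetOfA q r) then filterLoopA rest (prev ++ [r])
      else r :: filterLoopA rest (prev ++ [r])

-- A's nested dp loops (row i of the in-place matrix only reads row i-1, so the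
-- matrix is carried as the previous row together with the results list).
def dpLoopA (primer1 : String) (primer2 : String) (min_len : Int) :
    List Int × List (List (String × Int)) :=
  (PySem.List.pyRange 1 (PySem.Str.len primer1 + 1) 1).foldl
    (fun (st : List Int × List (List (String × Int))) i =>
      (PySem.List.pyRange 1 (PySem.Str.len primer2 + 1) 1).foldl
        (fun (rs : List Int × List (List (String × Int))) j =>
          if isComplementary (PySem.List.pyGetD primer1.toList (i - 1) '?')
                             (PySem.List.pyGetD primer2.toList (j - 1) '?') then
            let d := PySem.List.pyGetD st.1 (j - 1) 0 + 1
            if d ≥ min_len then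
              (rs.1 ++ [d], rs.2 ++ [[("Primer1_start", i - d), ("Primer1_end", i),
                                      ("Primer2_start", j - d), ("Primer2_end", j), ("Length", d)]])
            else (rs.1 ++ [d], rs.2)
          else (rs.1 ++ [(0 : Int)], rs.2))
        ([0], st.2))
    (List.replicate (PySem.Str.len primer2 + 1).toNat 0, [])

def find_all_complementary_primers (primer1 : String) (primer2 : String) (min_len : Int) : List (List (String × Int)) :=
  let st := dpLoopA primer1 primer2 min_len
  let resultsSorted := PySem.List.sorted2 st.2
    (fun x => PySem.Dict.getD ⟨x⟩ "Primer1_start" 0)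
    (fun x => -PySem.Dict.getD ⟨x⟩ "Length" 0)
  filterLoopA resultsSorted []

-- ===== PORT B =====
-- B walks every diagonal of the comparison grid once, emitting one entry per
-- maximal complementary run, then sorts those and keeps the containment-maximal ones.
def complementGet (c : Char) : Option Char :=
  PySem.Dict.get? ⟨[('A', 'T'), ('T', 'A'), ('C', 'G'), ('G', 'C')]⟩ c

def entryB (end1 : Int) (end2 : Int) (length : Int) : List (String × Int) :=
  [("Primer1_start", end1 - length), ("Primer1_end", end1),
   ("Primer2_start", end2 - length), ("Primer2_end", end2), ("Length", length)]

def containsB (q : List (String × Int)) (r : List (String × Int)) : Bool :=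
  decide (PySem.Dict.getD ⟨q⟩ "Primer1_start" 0 ≤ PySem.Dict.getD ⟨r⟩ "Primer1_start" 0) &&
  decide (PySem.Dict.getD ⟨q⟩ "Primer1_end" 0 ≥ PySem.Dict.getD ⟨r⟩ "Primer1_end" 0) &&
  decide (PySem.Dict.getD ⟨q⟩ "Primer2_start" 0 ≤ PySem.Dict.getD ⟨r⟩ "Primer2_start" 0) &&
  decide (PySem.Dict.getD ⟨q⟩ "Primer2_end" 0 ≥ PySem.Dict.getD ⟨r⟩ "Primer2_end" 0)

-- Source B's while loop down one diagonal, accumulating the maximal-run entries.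
def walkB (p1 : List Char) (p2 : List Char) (min_len : Int) (m : Int) (n : Int)
    (i : Int) (j : Int) (run : Int) (acc : List (List (String × Int))) :
    List (List (String × Int)) :=
  if h : i < m ∧ j < n then
    if complementGet (PySem.List.pyGetD p1 i '?') == some (PySem.List.pyGetD p2 j '?') then
      walkB p1 p2 min_len m n (i + 1) (j + 1) (run + 1) acc
    else
      walkB p1 p2 min_len m n (i + 1) (j + 1) 0
        (if run > 0 && run ≥ min_len then acc ++ [entryB i j run] else acc)
  else (if run > 0 && run ≥ min_len then acc ++ [entryB i j run] else acc)
termination_by (m - i).toNat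
decreasing_by all_goals omega

-- Source B's outer loop over the diagonal start points.
def candLoopB (primer1 : String) (primer2 : String) (min_len : Int) :
    List (List (String × Int)) :=
  ((PySem.List.pyRange (PySem.Str.len primer1 - 1) (-1) (-1)).map (fun i => (i, (0 : Int))) ++
   (PySem.List.pyRange 1 (PySem.Str.len primer2) 1).map (fun j => ((0 : Int), j))).foldl
    (fun acc s => walkB primer1.toList primer2.toList min_len
        (PySem.Str.len primer1) (PySem.Str.len primer2) s.1 s.2 0 acc) []

def find_all_complementary_primers_alt (primer1 : String) (primer2 : String) (min_len : Int) : List (List (String × Int)) :=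
  let candidates := candLoopB primer1 primer2 min_len
  let sortedC := PySem.List.sorted2 candidates
    (fun x => PySem.Dict.getD ⟨x⟩ "Primer1_start" 0)
    (fun x => -PySem.Dict.getD ⟨x⟩ "Length" 0)
  sortedC.filter (fun r => !(sortedC.any (fun q => q != r && containsB q r)))

-- ===== PRECONDITION & SPEC =====
def Spec_find_all_complementary_primers (primer1 : String) (primer2 : String) (min_len : Int) (out : List (List (String × Int))) : Prop := out = find_all_complementary_primers_alt primer1 primer2 min_len
instance (primer1 : String) (primer2 : String) (min_len : Int) (out : List (List (String × Int))) : Decidable (Spec_find_all_complementary_primers primer1 primer2 min_len out) := by unfold Spec_find_all_complementary_primers; infer_instance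

-- ===== CLAIM (what is proved, stated in full; the proofs are below) =====
def Claim_equal_find_all_complementary_primers : Prop := ∀ (primer1 : String) (primer2 : String) (min_len : Int), Dom_find_all_complementary_primers primer1 primer2 min_len → Spec_find_all_complementary_primers primer1 primer2 min_len (find_all_complementary_primers primer1 primer2 min_len)

-- ===== LEMMAS AND PROOFS =====

-- run length of the complementary streak ending at 1-based cell (x, y)
def rl (p1 : List Char) (p2 : List Char) : Nat → Nat → Nat
  | 0, _ => 0
  | _ + 1, 0 => 0
  | x + 1, y + 1 =>
      if isComplementary (p1.getD x '?') (p2.getD y '?') then rl p1 p2 x y + 1 else 0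

-- the entry both programs build for a run of length L ending at 1-based (x, y)
def toE (x : Nat) (y : Nat) (L : Nat) : List (String × Int) :=
  [("Primer1_start", (x : Int) - (L : Int)), ("Primer1_end", (x : Int)),
   ("Primer2_start", (y : Int) - (L : Int)), ("Primer2_end", (y : Int)), ("Length", (L : Int))]

def kp1 (e : List (String × Int)) : Int := PySem.Dict.getD ⟨e⟩ "Primer1_start" 0
def kp2 (e : List (String × Int)) : Int := -PySem.Dict.getD ⟨e⟩ "Length" 0
def kp3 (e : List (String × Int)) : Int := PySem.Dict.getD ⟨e⟩ "Primer2_start" 0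
def ke1 (e : List (String × Int)) : Int := PySem.Dict.getD ⟨e⟩ "Primer1_end" 0
def ke2 (e : List (String × Int)) : Int := PySem.Dict.getD ⟨e⟩ "Primer2_end" 0

def key2eq (a b : List (String × Int)) : Prop := kp1 a = kp1 b ∧ kp2 a = kp2 b
def key2lt (a b : List (String × Int)) : Prop := kp1 a < kp1 b ∨ (kp1 a = kp1 b ∧ kp2 a < kp2 b)
def key3lt (a b : List (String × Int)) : Prop := key2lt a b ∨ (key2eq a b ∧ kp3 a < kp3 b)
def tieR (a b : List (String × Int)) : Prop := key2eq a b → kp3 a < kp3 b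
def subRel (q r : List (String × Int)) : Prop :=
  kp1 q ≤ kp1 r ∧ ke1 r ≤ ke1 q ∧ kp3 q ≤ kp3 r ∧ ke2 r ≤ ke2 q
def shaped (e : List (String × Int)) : Prop := ∃ x y L : Nat, e = toE x y L

-- candidate cells
def isCandA (p1 p2 : List Char) (ml : Int) (x y : Nat) : Prop :=
  1 ≤ rl p1 p2 x y ∧ ml ≤ (rl p1 p2 x y : Int)
def isCandB (p1 p2 : List Char) (ml : Int) (x y : Nat) : Prop :=
  isCandA p1 p2 ml x y ∧
  (x = p1.length ∨ y = p2.length ∨ isComplementary (p1.getD x '?') (p2.getD y '?') = false)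

def rowVals (p1 p2 : List Char) (x : Nat) : List Int :=
  0 :: (List.range p2.length).map (fun t => (rl p1 p2 x (t + 1) : Int))
def rowEmit (p1 p2 : List Char) (ml : Int) (x : Nat) : List (List (String × Int)) :=
  (List.range p2.length).filterMap (fun t =>
    if 1 ≤ rl p1 p2 x (t + 1) ∧ ml ≤ (rl p1 p2 x (t + 1) : Int)
    then some (toE x (t + 1) (rl p1 p2 x (t + 1))) else none)
def canA (p1 p2 : List Char) (ml : Int) : List (List (String × Int)) :=
  (List.range p1.length).flatMap (fun a => rowEmit p1 p2 ml (a + 1))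

def specDiag (p1 p2 : List Char) (ml : Int) (x y : Nat) : List (List (String × Int)) :=
  if h : x < p1.length ∧ y < p2.length then
    if isComplementary (p1.getD x '?') (p2.getD y '?') = true then specDiag p1 p2 ml (x + 1) (y + 1)
    else (if 1 ≤ rl p1 p2 x y ∧ ml ≤ (rl p1 p2 x y : Int)
          then [toE x y (rl p1 p2 x y)] else []) ++ specDiag p1 p2 ml (x + 1) (y + 1)
  else (if 1 ≤ rl p1 p2 x y ∧ ml ≤ (rl p1 p2 x y : Int) then [toE x y (rl p1 p2 x y)] else [])
termination_by p1.length - x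
decreasing_by all_goals omega

def canB (p1 p2 : List Char) (ml : Int) : List (List (String × Int)) :=
  (List.range p1.length).flatMap (fun k => specDiag p1 p2 ml (p1.length - 1 - k) 0) ++
  (List.range (p2.length - 1)).flatMap (fun t => specDiag p1 p2 ml 0 (t + 1))

-- ---------- small facts about entries and keys ----------

theorem kp1_toE (x y L : Nat) : kp1 (toE x y L) = (x : Int) - L := by
  simp [kp1, toE, PySem.Dict.getD_eq_get?_getD, PySem.Dict.get?_mk_cons]

theorem kp2_toE (x y L : Nat) : kp2 (toE x y L) = -(L : Int) := by
  simp [kp2, toE, PySem.Dict.getD_eq_get?_getD, PySem.Dict.get?_mk_cons]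

theorem kp3_toE (x y L : Nat) : kp3 (toE x y L) = (y : Int) - L := by
  simp [kp3, toE, PySem.Dict.getD_eq_get?_getD, PySem.Dict.get?_mk_cons]

theorem ke1_toE (x y L : Nat) : ke1 (toE x y L) = (x : Int) := by
  simp [ke1, toE, PySem.Dict.getD_eq_get?_getD, PySem.Dict.get?_mk_cons]

theorem ke2_toE (x y L : Nat) : ke2 (toE x y L) = (y : Int) := by
  simp [ke2, toE, PySem.Dict.getD_eq_get?_getD, PySem.Dict.get?_mk_cons]

theorem toE_inj {x y L x' y' L' : Nat} :
    toE x y L = toE x' y' L' ↔ (x = x' ∧ y = y' ∧ L = L') := by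
  constructor
  · intro h
    simp only [toE, List.cons.injEq, Prod.mk.injEq, and_true] at h
    omega
  · rintro ⟨rfl, rfl, rfl⟩; rfl

theorem key3lt_trans {a b c : List (String × Int)} (h1 : key3lt a b) (h2 : key3lt b c) : key3lt a c := by
  unfold key3lt key2lt key2eq at *; omega

theorem key3lt_irrefl (a : List (String × Int)) : ¬ key3lt a a := by
  unfold key3lt key2lt key2eq; omega

theorem key3lt_asymm {a b : List (String × Int)} (h : key3lt a b) : ¬ key3lt b a := by
  unfold key3lt key2lt key2eq at *; omega

theorem key2lt_key3lt {a b : List (String × Int)} (h : key2lt a b) : key3lt a b := by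
  unfold key3lt key2lt key2eq at *; omega

theorem key3lt_ne {a b : List (String × Int)} (h : key3lt a b) : a ≠ b := by
  rintro rfl; exact key3lt_irrefl a h

theorem subRel_trans {a b c : List (String × Int)} (h1 : subRel a b) (h2 : subRel b c) : subRel a c := by
  unfold subRel at *; omega

theorem subRel_key2lt {q r : List (String × Int)} (hq : shaped q) (hr : shaped r)
    (hs : subRel q r) (hne : q ≠ r) : key2lt q r := by
  obtain ⟨x', y', L', rfl⟩ := hq
  obtain ⟨x, y, L, rfl⟩ := hr
  have hne' : ¬ (x' = x ∧ y' = y ∧ L' = L) := fun h => hne (toE_inj.mpr h)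
  unfold subRel at hs
  unfold key2lt
  simp only [kp1_toE, kp2_toE, kp3_toE, ke1_toE, ke2_toE] at *
  omega

theorem subsetOfA_iff (q r : List (String × Int)) : subsetOfA q r = true ↔ subRel q r := by
  simp [subsetOfA, subRel, kp1, kp3, ke1, ke2, ge_iff_le, Bool.and_eq_true, decide_eq_true_eq, and_assoc]

theorem containsB_eq_subsetOfA : containsB = subsetOfA := rfl

-- ---------- facts about rl ----------

theorem isComp_qmark_right (c : Char) : isComplementary c '?' = false := by
  simp [isComplementary]

theorem isComp_qmark_left (c : Char) : isComplementary '?' c = false := by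
  simp [isComplementary]

theorem rl_zero_right (p1 p2 : List Char) (x : Nat) : rl p1 p2 x 0 = 0 := by
  cases x <;> simp [rl]

theorem rl_pos {p1 p2 : List Char} {x y : Nat} (h : 1 ≤ rl p1 p2 x y) :
    1 ≤ x ∧ 1 ≤ y ∧ x ≤ p1.length ∧ y ≤ p2.length := by
  match x, y with
  | 0, _ => simp [rl] at h
  | _ + 1, 0 => simp [rl] at h
  | a + 1, b + 1 =>
    rw [rl] at h
    by_cases hc : isComplementary (p1.getD a '?') (p2.getD b '?') = true
    · have ha : a < p1.length := by
        by_contra hlen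
        have e1 : p1.getD a '?' = '?' := by apply List.getD_eq_default; omega
        rw [e1, isComp_qmark_left] at hc
        exact Bool.false_ne_true hc
      have hb : b < p2.length := by
        by_contra hlen
        have e2 : p2.getD b '?' = '?' := by apply List.getD_eq_default; omega
        rw [e2, isComp_qmark_right] at hc
        exact Bool.false_ne_true hc
      omega
    · rw [if_neg hc] at h; omega

theorem rl_succ (p1 p2 : List Char) (x y : Nat) :
    rl p1 p2 (x + 1) (y + 1) =
    (if isComplementary (p1.getD x '?') (p2.getD y '?') then rl p1 p2 x y + 1 else 0) := by
  rw [rl]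

theorem rl_big_right {p1 p2 : List Char} {x y : Nat} (h : p2.length < y) : rl p1 p2 x y = 0 := by
  match x, y with
  | 0, _ => simp [rl]
  | _ + 1, 0 => simp [rl]
  | a + 1, b + 1 =>
    have e2 : p2.getD b '?' = '?' := by apply List.getD_eq_default; omega
    rw [rl, e2, isComp_qmark_right]
    simp

-- climb to the end of the run: every candidate cell extends to a maximal one
theorem exists_ext (p1 p2 : List Char) (ml : Int) :
    ∀ (fuel x y : Nat), p1.length - x ≤ fuel → 1 ≤ rl p1 p2 x y → ml ≤ (rl p1 p2 x y : Int) →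
    ∃ t : Nat, isCandB p1 p2 ml (x + t) (y + t) ∧ rl p1 p2 (x + t) (y + t) = rl p1 p2 x y + t := by
  intro fuel
  induction fuel with
  | zero =>
    intro x y hf h1 h2
    have hb := rl_pos h1
    exact ⟨0, ⟨⟨by simpa using h1, by simpa using h2⟩, Or.inl (by omega)⟩, by simp⟩
  | succ f ih =>
    intro x y hf h1 h2
    by_cases hB : x = p1.length ∨ y = p2.length ∨ isComplementary (p1.getD x '?') (p2.getD y '?') = false
    · exact ⟨0, ⟨⟨by simpa using h1, by simpa using h2⟩, by simpa using hB⟩, by simp⟩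
    · push_neg at hB
      obtain ⟨hx, hy, hc⟩ := hB
      rw [Bool.ne_false_iff] at hc
      have hb := rl_pos h1
      have hr1 : rl p1 p2 (x + 1) (y + 1) = rl p1 p2 x y + 1 := by
        rw [rl_succ, if_pos hc]
      obtain ⟨t, ht1, ht2⟩ := ih (x + 1) (y + 1) (by omega) (by omega)
        (by rw [hr1]; push_cast; omega)
      refine ⟨t + 1, ?_, ?_⟩
      · rw [show x + (t + 1) = x + 1 + t by omega, show y + (t + 1) = y + 1 + t by omega]
        exact ht1
      · rw [show x + (t + 1) = x + 1 + t by omega, show y + (t + 1) = y + 1 + t by omega,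
            ht2, hr1]
        omega

-- ---------- canA ----------

theorem mem_canA {p1 p2 : List Char} {ml : Int} {e : List (String × Int)} :
    e ∈ canA p1 p2 ml ↔ ∃ x y : Nat, isCandA p1 p2 ml x y ∧ e = toE x y (rl p1 p2 x y) := by
  unfold canA rowEmit
  simp only [List.mem_flatMap, List.mem_filterMap, List.mem_range]
  constructor
  · rintro ⟨a, ha, t, ht, hsome⟩
    split at hsome
    · exact ⟨a + 1, t + 1, by assumption, by simpa using hsome.symm⟩
    · exact absurd hsome (by simp)
  · rintro ⟨x, y, hC, rfl⟩
    have hb := rl_pos hC.1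
    refine ⟨x - 1, by omega, y - 1, by omega, ?_⟩
    have hx : x - 1 + 1 = x := by omega
    have hy : y - 1 + 1 = y := by omega
    rw [hx, hy, if_pos ⟨hC.1, hC.2⟩]

theorem canA_tie (p1 p2 : List Char) (ml : Int) : (canA p1 p2 ml).Pairwise tieR := by
  unfold canA
  rw [List.pairwise_flatMap]
  constructor
  · intro a _
    unfold rowEmit
    rw [List.pairwise_filterMap]
    refine List.Pairwise.imp_of_mem ?_ (List.pairwise_lt_range)
    intro t t' hmt hmt' hlt b hb b' hb'
    split at hb
    case isTrue h =>
      split at hb'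
      case isTrue h' =>
        obtain rfl : b = toE (a+1) (t+1) (rl p1 p2 (a+1) (t+1)) := by injection hb with h; exact h.symm
        obtain rfl : b' = toE (a+1) (t'+1) (rl p1 p2 (a+1) (t'+1)) := by injection hb' with h; exact h.symm
        intro hk
        unfold key2eq at hk
        rw [kp1_toE, kp1_toE, kp2_toE, kp2_toE] at hk
        rw [kp3_toE, kp3_toE]
        omega
      case isFalse => exact absurd hb' (by simp)
    case isFalse => exact absurd hb (by simp)
  · refine List.Pairwise.imp_of_mem ?_ (List.pairwise_lt_range)
    intro a a' hma hma' hlt b hb b' hb'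
    unfold rowEmit at hb hb'
    rw [List.mem_filterMap] at hb hb'
    obtain ⟨t, _, hbt⟩ := hb
    obtain ⟨t', _, hbt'⟩ := hb'
    split at hbt; case isFalse => exact absurd hbt (by simp)
    split at hbt'; case isFalse => exact absurd hbt' (by simp)
    obtain rfl : b = toE (a+1) (t+1) (rl p1 p2 (a+1) (t+1)) := by injection hbt with h; exact h.symm
    obtain rfl : b' = toE (a'+1) (t'+1) (rl p1 p2 (a'+1) (t'+1)) := by injection hbt' with h; exact h.symm
    intro hk
    unfold key2eq at hk
    rw [kp1_toE, kp1_toE, kp2_toE, kp2_toE] at hk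
    omega

-- ---------- specDiag / canB ----------

theorem mem_specDiag_stop {p1 p2 : List Char} {ml : Int} {e : List (String × Int)} {x y : Nat}
    (hin : ¬ (x < p1.length ∧ y < p2.length)) :
    e ∈ specDiag p1 p2 ml x y ↔
      ∃ t : Nat, isCandB p1 p2 ml (x + t) (y + t) ∧
        e = toE (x + t) (y + t) (rl p1 p2 (x + t) (y + t)) := by
  rw [specDiag, dif_neg hin]
  constructor
  · intro he
    split at he
    case isTrue hc =>
      rw [List.mem_singleton] at he
      have hb := rl_pos hc.1
      refine ⟨0, ⟨⟨by simpa using hc.1, by simpa using hc.2⟩, ?_⟩, by simpa using he⟩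
      have hd : x = p1.length ∨ y = p2.length := by omega
      rcases hd with hd | hd
      · exact Or.inl (by omega)
      · exact Or.inr (Or.inl (by omega))
    case isFalse => simp at he
  · rintro ⟨t, hcB, rfl⟩
    have hb := rl_pos hcB.1.1
    have ht0 : t = 0 := by omega
    subst ht0
    simp only [Nat.add_zero] at hcB ⊢
    rw [if_pos (show 1 ≤ rl p1 p2 x y ∧ ml ≤ (rl p1 p2 x y : Int) from hcB.1)]
    simp

theorem mem_specDiag {p1 p2 : List Char} {ml : Int} {e : List (String × Int)} :
    ∀ (fuel x y : Nat), p1.length - x ≤ fuel →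
    (e ∈ specDiag p1 p2 ml x y ↔
      ∃ t : Nat, isCandB p1 p2 ml (x + t) (y + t) ∧ e = toE (x + t) (y + t) (rl p1 p2 (x + t) (y + t))) := by
  intro fuel
  induction fuel with
  | zero =>
    intro x y hf
    exact mem_specDiag_stop (by omega)
  | succ f ih =>
    intro x y hf
    by_cases hin : x < p1.length ∧ y < p2.length
    · rw [specDiag, dif_pos hin]
      by_cases hc : isComplementary (p1.getD x '?') (p2.getD y '?') = true
      · rw [if_pos hc, ih (x + 1) (y + 1) (by omega)]
        constructor
        · rintro ⟨t, h1, h2⟩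
          refine ⟨t + 1, ?_, ?_⟩
          · rw [show x + (t + 1) = x + 1 + t by omega, show y + (t + 1) = y + 1 + t by omega]
            exact h1
          · rw [show x + (t + 1) = x + 1 + t by omega, show y + (t + 1) = y + 1 + t by omega]
            exact h2
        · rintro ⟨t, h1, h2⟩
          cases t with
          | zero =>
            exfalso
            rcases h1.2 with h | h | h
            · omega
            · omega
            · simp only [Nat.add_zero] at h
              rw [h] at hc
              exact Bool.false_ne_true hc
          | succ s =>
            refine ⟨s, ?_, ?_⟩
            · rw [show x + 1 + s = x + (s + 1) by omega, show y + 1 + s = y + (s + 1) by omega]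
              exact h1
            · rw [show x + 1 + s = x + (s + 1) by omega, show y + 1 + s = y + (s + 1) by omega]
              exact h2
      · rw [if_neg hc]
        rw [Bool.not_eq_true] at hc
        rw [List.mem_append, ih (x + 1) (y + 1) (by omega)]
        constructor
        · rintro (he | ⟨t, h1, h2⟩)
          · split at he
            next hcnd =>
              rw [List.mem_singleton] at he
              refine ⟨0, ⟨by simpa using hcnd, ?_⟩, by simpa using he⟩
              exact Or.inr (Or.inr (by simpa using hc))
            next => simp at he
          · refine ⟨t + 1, ?_, ?_⟩
            · rw [show x + (t + 1) = x + 1 + t by omega, show y + (t + 1) = y + 1 + t by omega]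
              exact h1
            · rw [show x + (t + 1) = x + 1 + t by omega, show y + (t + 1) = y + 1 + t by omega]
              exact h2
        · rintro ⟨t, h1, h2⟩
          cases t with
          | zero =>
            left
            simp only [Nat.add_zero] at h1 h2
            rw [if_pos (show 1 ≤ rl p1 p2 x y ∧ ml ≤ (rl p1 p2 x y : Int) from h1.1)]
            rw [List.mem_singleton]
            exact h2
          | succ s =>
            right
            refine ⟨s, ?_, ?_⟩
            · rw [show x + 1 + s = x + (s + 1) by omega, show y + 1 + s = y + (s + 1) by omega]
              exact h1
            · rw [show x + 1 + s = x + (s + 1) by omega, show y + 1 + s = y + (s + 1) by omega]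
              exact h2
    · exact mem_specDiag_stop hin

theorem specDiag_pairwise {p1 p2 : List Char} {ml : Int} :
    ∀ (fuel x y : Nat), p1.length - x ≤ fuel →
    (specDiag p1 p2 ml x y).Pairwise (fun e e' => ke1 e < ke1 e') := by
  intro fuel
  induction fuel with
  | zero =>
    intro x y hf
    rw [specDiag, dif_neg (by omega)]
    split
    · simp
    · simp
  | succ f ih =>
    intro x y hf
    by_cases hin : x < p1.length ∧ y < p2.length
    · rw [specDiag, dif_pos hin]
      by_cases hc : isComplementary (p1.getD x '?') (p2.getD y '?') = true
      · rw [if_pos hc]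
        exact ih (x + 1) (y + 1) (by omega)
      · rw [if_neg hc]
        rw [List.pairwise_append]
        refine ⟨?_, ih (x + 1) (y + 1) (by omega), ?_⟩
        · split
          · simp
          · simp
        · intro a ha b hb
          obtain ⟨t, _, rfl⟩ := (mem_specDiag p1.length (x + 1) (y + 1) (by omega)).mp hb
          split at ha
          next =>
            rw [List.mem_singleton] at ha
            subst ha
            rw [ke1_toE, ke1_toE]
            push_cast
            omega
          next => simp at ha
    · rw [specDiag, dif_neg hin]
      split
      · simp
      · simp

theorem mem_canB {p1 p2 : List Char} {ml : Int} {e : List (String × Int)} :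
    e ∈ canB p1 p2 ml ↔ ∃ x y : Nat, isCandB p1 p2 ml x y ∧ e = toE x y (rl p1 p2 x y) := by
  unfold canB
  rw [List.mem_append]
  simp only [List.mem_flatMap, List.mem_range]
  constructor
  · rintro (⟨k, hk, he⟩ | ⟨t, ht, he⟩)
    · obtain ⟨s, h1, rfl⟩ := (mem_specDiag p1.length _ _ (by omega)).mp he
      exact ⟨_, _, h1, rfl⟩
    · obtain ⟨s, h1, rfl⟩ := (mem_specDiag p1.length _ _ (by omega)).mp he
      exact ⟨_, _, h1, rfl⟩
  · rintro ⟨x, y, hB, rfl⟩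
    have hb := rl_pos hB.1.1
    by_cases hxy : y ≤ x
    · left
      refine ⟨p1.length - 1 - (x - y), by omega, ?_⟩
      have e1 : p1.length - 1 - (p1.length - 1 - (x - y)) = x - y := by omega
      rw [e1]
      apply (mem_specDiag p1.length _ _ (by omega)).mpr
      refine ⟨y, ?_, ?_⟩
      · rw [show x - y + y = x by omega, show 0 + y = y by omega]
        exact hB
      · rw [show x - y + y = x by omega, show 0 + y = y by omega]
    · right
      refine ⟨y - x - 1, by omega, ?_⟩
      have e1 : y - x - 1 + 1 = y - x := by omega
      rw [e1]
      apply (mem_specDiag p1.length _ _ (by omega)).mpr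
      refine ⟨x, ?_, ?_⟩
      · rw [show 0 + x = x by omega, show y - x + x = y by omega]
        exact hB
      · rw [show 0 + x = x by omega, show y - x + x = y by omega]

theorem tie_of_ke1ne {x y L x' y' L' : Nat} (hne : (x : Int) ≠ (x' : Int)) :
    tieR (toE x y L) (toE x' y' L') := by
  intro hk
  unfold key2eq at hk
  rw [kp1_toE, kp1_toE, kp2_toE, kp2_toE] at hk
  omega

theorem tie_of_diag {x y L x' y' L' : Nat} (hd : (x' : Int) - y' < (x : Int) - y) :
    tieR (toE x y L) (toE x' y' L') := by
  intro hk
  unfold key2eq at hk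
  rw [kp1_toE, kp1_toE, kp2_toE, kp2_toE] at hk
  rw [kp3_toE, kp3_toE]
  omega

theorem specDiag_tie {p1 p2 : List Char} {ml : Int} (x y : Nat) :
    (specDiag p1 p2 ml x y).Pairwise tieR := by
  refine List.Pairwise.imp_of_mem ?_ (specDiag_pairwise p1.length x y (by omega))
  intro a b hma hmb hlt
  obtain ⟨t, _, rfl⟩ := (mem_specDiag p1.length x y (by omega)).mp hma
  obtain ⟨t', _, rfl⟩ := (mem_specDiag p1.length x y (by omega)).mp hmb
  rw [ke1_toE, ke1_toE] at hlt
  exact tie_of_ke1ne (by omega)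

theorem canB_tie (p1 p2 : List Char) (ml : Int) : (canB p1 p2 ml).Pairwise tieR := by
  unfold canB
  rw [List.pairwise_append]
  refine ⟨?_, ?_, ?_⟩
  · rw [List.pairwise_flatMap]
    refine ⟨fun k _ => specDiag_tie _ _, ?_⟩
    refine List.Pairwise.imp_of_mem ?_ List.pairwise_lt_range
    intro k k' hmk hmk' hlt a ha b hb
    rw [List.mem_range] at hmk hmk'
    obtain ⟨t, _, rfl⟩ := (mem_specDiag p1.length _ _ (by omega)).mp ha
    obtain ⟨t', _, rfl⟩ := (mem_specDiag p1.length _ _ (by omega)).mp hb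
    exact tie_of_diag (by push_cast; omega)
  · rw [List.pairwise_flatMap]
    refine ⟨fun t _ => specDiag_tie _ _, ?_⟩
    refine List.Pairwise.imp_of_mem ?_ List.pairwise_lt_range
    intro t t' hmt hmt' hlt a ha b hb
    rw [List.mem_range] at hmt hmt'
    obtain ⟨s, _, rfl⟩ := (mem_specDiag p1.length _ _ (by omega)).mp ha
    obtain ⟨s', _, rfl⟩ := (mem_specDiag p1.length _ _ (by omega)).mp hb
    exact tie_of_diag (by push_cast; omega)
  · intro a ha b hb
    rw [List.mem_flatMap] at ha hb
    obtain ⟨k, hk, ha⟩ := ha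
    obtain ⟨t, ht, hb⟩ := hb
    rw [List.mem_range] at hk ht
    obtain ⟨s, _, rfl⟩ := (mem_specDiag p1.length _ _ (by omega)).mp ha
    obtain ⟨s', _, rfl⟩ := (mem_specDiag p1.length _ _ (by omega)).mp hb
    exact tie_of_diag (by push_cast; omega)

-- ---------- the stable sort produces a strictly key3lt-ordered list ----------

def ltB2 (a b : List (String × Int)) : Bool :=
  decide (kp1 a < kp1 b) || !decide (kp1 b < kp1 a) && decide (kp2 a < kp2 b)

theorem ltB2_iff (a b : List (String × Int)) : ltB2 a b = true ↔ key2lt a b := by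
  unfold ltB2 key2lt
  simp only [Bool.or_eq_true, Bool.and_eq_true, Bool.not_eq_true', decide_eq_true_eq, decide_eq_false_iff_not]
  omega

theorem insert_strict (x : List (String × Int)) (acc : List (List (String × Int)))
    (h1 : acc.Pairwise key3lt) (h2 : ∀ y ∈ acc, tieR y x) :
    (PySem.List.insertBy ltB2 x acc).Pairwise key3lt := by
  induction acc with
  | nil => simp [PySem.List.insertBy]
  | cons y ys ih =>
    have hstep : PySem.List.insertBy ltB2 x (y :: ys) =
        if ltB2 x y = true then x :: y :: ys else y :: PySem.List.insertBy ltB2 x ys := rfl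
    rw [hstep]
    rcases List.pairwise_cons.mp h1 with ⟨hy, hys⟩
    split
    case isTrue hxy =>
      refine List.pairwise_cons.mpr ⟨?_, h1⟩
      intro z hz
      have hk : key3lt x y := key2lt_key3lt ((ltB2_iff x y).mp hxy)
      rw [List.mem_cons] at hz
      rcases hz with hzy | hz
      · rw [hzy]; exact hk
      · exact key3lt_trans hk (hy z hz)
    case isFalse hxy =>
      refine List.pairwise_cons.mpr ⟨?_, ih hys (fun z hz => h2 z (by simp [hz]))⟩
      intro z hz
      rw [PySem.List.mem_insertBy] at hz
      rcases hz with hzx | hz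
      · -- z = x: y precedes the freshly inserted x
        rw [hzx]
        have hnlt : ¬ key2lt x y := fun h => hxy ((ltB2_iff x y).mpr h)
        have hty := h2 y (by simp)
        unfold tieR key2eq at hty
        unfold key2lt at hnlt
        unfold key3lt key2lt key2eq
        omega
      · exact hy z hz

theorem sorted2_strict (l : List (List (String × Int))) (h : l.Pairwise tieR) :
    (PySem.List.sorted2 l kp1 kp2 false).Pairwise key3lt := by
  have hrw : PySem.List.sorted2 l kp1 kp2 false =
      l.foldl (fun acc x => PySem.List.insertBy ltB2 x acc) [] := rfl
  rw [hrw]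
  suffices H : ∀ (l' : List (List (String × Int))) (acc : List (List (String × Int))),
      acc.Pairwise key3lt → (∀ x ∈ l', ∀ y ∈ acc, tieR y x) → l'.Pairwise tieR →
      (l'.foldl (fun acc x => PySem.List.insertBy ltB2 x acc) acc).Pairwise key3lt by
    exact H l [] (by simp) (by simp) h
  intro l'
  induction l' with
  | nil => intro acc h1 _ _; simpa using h1
  | cons x xs ih =>
    intro acc h1 h2 h3
    rcases List.pairwise_cons.mp h3 with ⟨hx, hxs⟩
    simp only [List.foldl_cons]
    refine ih _ (insert_strict x acc h1 (fun y hy => h2 x (by simp) y hy)) ?_ hxs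
    intro z hz y hy
    rw [PySem.List.mem_insertBy] at hy
    rcases hy with rfl | hy
    · exact hx z hz
    · exact h2 z (by simp [hz]) y hy

-- ---------- A's subset-filter loop scans exactly the containment test ----------

theorem filterLoopA_spec (full : List (List (String × Int)))
    (hpw : full.Pairwise key3lt) (hsh : ∀ e ∈ full, shaped e) :
    ∀ (l prev : List (List (String × Int))), prev ++ l = full →
    filterLoopA l prev = l.filter (fun r => !(full.any (fun q => (q != r) && subsetOfA q r))) := by
  intro l
  induction l with
  | nil => intro prev _; rfl
  | cons r rest ih =>
    intro prev hsplit
    have hmemr : r ∈ full := by rw [← hsplit]; simp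
    have hcond : (prev.any (fun q => subsetOfA q r)) =
        (full.any (fun q => (q != r) && subsetOfA q r)) := by
      rw [← hsplit]
      simp only [List.any_append, List.any_cons]
      have hprevne : ∀ q ∈ prev, q ≠ r := by
        intro q hq
        have := (List.pairwise_append.mp (by rw [hsplit]; exact hpw)).2.2 q hq r (by simp)
        exact key3lt_ne this
      have h1 : prev.any (fun q => (q != r) && subsetOfA q r) = prev.any (fun q => subsetOfA q r) := by
        apply PySem.List.any_congr_mem
        intro q hq
        simp [bne_iff_ne, hprevne q hq]
      have h2 : ((r != r) && subsetOfA r r) = false := by simp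
      have h3 : rest.any (fun q => (q != r) && subsetOfA q r) = false := by
        rw [List.any_eq_false]
        intro q hq
        simp only [Bool.and_eq_true, bne_iff_ne, ne_eq, not_and]
        intro hne hsub
        have hpwr : (r :: rest).Pairwise key3lt :=
          (List.pairwise_append.mp (by rw [hsplit]; exact hpw)).2.1
        have hrq : key3lt r q := (List.pairwise_cons.mp hpwr).1 q hq
        have hq' : q ∈ full := by rw [← hsplit]; simp [hq]
        have hqr : key2lt q r := subRel_key2lt (hsh q hq') (hsh r hmemr)
          ((subsetOfA_iff q r).mp hsub) hne
        exact key3lt_asymm (key2lt_key3lt hqr) hrq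
      rw [h1, h2, h3]
      simp
    rw [filterLoopA]
    rw [hcond]
    have hrest := ih (prev ++ [r]) (by rw [← hsplit]; simp)
    rw [List.filter_cons]
    by_cases hc : (full.any (fun q => (q != r) && subsetOfA q r)) = true
    · rw [if_pos hc, hrest]
      simp [hc]
    · rw [if_neg hc, hrest]
      simp only [Bool.not_eq_true] at hc
      simp [hc]

-- ---------- bridges from the ports to the spec lists ----------

theorem strlen_toList (s : String) : PySem.Str.len s = (s.toList.length : Int) := by
  simp [pysem]

theorem complementGet_eq (c1 c2 : Char) :
    (complementGet c1 == some c2) = isComplementary c1 c2 := by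
  by_cases h1 : c1 = 'A'
  · subst h1
    rw [Bool.eq_iff_iff]
    simp [complementGet, PySem.Dict.get?_mk_cons, isComplementary]
    exact eq_comm
  · by_cases h2 : c1 = 'T'
    · subst h2
      rw [Bool.eq_iff_iff]
      simp [complementGet, PySem.Dict.get?_mk_cons, isComplementary]
      exact eq_comm
    · by_cases h3 : c1 = 'C'
      · subst h3
        rw [Bool.eq_iff_iff]
        simp [complementGet, PySem.Dict.get?_mk_cons, isComplementary]
        exact eq_comm
      · by_cases h4 : c1 = 'G'
        · subst h4
          rw [Bool.eq_iff_iff]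
          simp [complementGet, PySem.Dict.get?_mk_cons, isComplementary]
          exact eq_comm
        · rw [Bool.eq_iff_iff]
          simp [complementGet, PySem.Dict.get?_mk_cons, isComplementary,
            Ne.symm h1, Ne.symm h2, Ne.symm h3, Ne.symm h4, h1, h2, h3, h4,
            show ({ items := [] } : PySem.Dict Char Char).get? c1 = none from rfl]

theorem entryB_toE (x y L : Nat) : entryB (x : Int) (y : Int) (L : Int) = toE x y L := rfl

theorem walkB_stop (p1 p2 : List Char) (ml : Int) (x y : Nat)
    (acc : List (List (String × Int))) (hin : ¬ (x < p1.length ∧ y < p2.length)) :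
    walkB p1 p2 ml (p1.length : Int) (p2.length : Int) (x : Int) (y : Int) (rl p1 p2 x y : Int) acc =
    acc ++ specDiag p1 p2 ml x y := by
  rw [walkB, specDiag]
  rw [dif_neg (show ¬ ((x : Int) < (p1.length : Int) ∧ (y : Int) < (p2.length : Int)) from by
    push_cast; omega)]
  rw [dif_neg hin]
  by_cases hg : 1 ≤ rl p1 p2 x y ∧ ml ≤ (rl p1 p2 x y : Int)
  · rw [if_pos (show ((rl p1 p2 x y : Int) > 0 && (rl p1 p2 x y : Int) ≥ ml) = true from by
      simp only [Bool.and_eq_true, decide_eq_true_eq]; omega)]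
    rw [if_pos hg, entryB_toE]
  · rw [if_neg (show ¬ ((rl p1 p2 x y : Int) > 0 && (rl p1 p2 x y : Int) ≥ ml) = true from by
      simp only [Bool.and_eq_true, decide_eq_true_eq]; omega)]
    rw [if_neg hg]
    simp

theorem walkB_eq_specDiag (p1 p2 : List Char) (ml : Int) :
    ∀ (fuel x y : Nat) (acc : List (List (String × Int))), p1.length - x ≤ fuel →
    walkB p1 p2 ml (p1.length : Int) (p2.length : Int) (x : Int) (y : Int) (rl p1 p2 x y : Int) acc =
    acc ++ specDiag p1 p2 ml x y := by
  intro fuel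
  induction fuel with
  | zero =>
    intro x y acc hf
    exact walkB_stop p1 p2 ml x y acc (by omega)
  | succ f ih =>
    intro x y acc hf
    by_cases hin : x < p1.length ∧ y < p2.length
    · rw [walkB, specDiag]
      rw [dif_pos (show (x : Int) < (p1.length : Int) ∧ (y : Int) < (p2.length : Int) from by
        push_cast; omega)]
      rw [dif_pos hin]
      have hpg1 : PySem.List.pyGetD p1 (x : Int) '?' = p1.getD x '?' := by simp
      have hpg2 : PySem.List.pyGetD p2 (y : Int) '?' = p2.getD y '?' := by simp
      rw [hpg1, hpg2, complementGet_eq]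
      by_cases hc : isComplementary (p1.getD x '?') (p2.getD y '?') = true
      · rw [if_pos hc, if_pos hc]
        have e1 : (x : Int) + 1 = ((x + 1 : Nat) : Int) := by push_cast; ring
        have e2 : (y : Int) + 1 = ((y + 1 : Nat) : Int) := by push_cast; ring
        have e3 : (rl p1 p2 x y : Int) + 1 = ((rl p1 p2 (x + 1) (y + 1) : Nat) : Int) := by
          rw [rl_succ, if_pos hc]; push_cast; ring
        rw [e1, e2, e3]
        exact ih (x + 1) (y + 1) acc (by omega)
      · rw [if_neg hc, if_neg hc]
        have e1 : (x : Int) + 1 = ((x + 1 : Nat) : Int) := by push_cast; ring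
        have e2 : (y : Int) + 1 = ((y + 1 : Nat) : Int) := by push_cast; ring
        have e3 : (0 : Int) = ((rl p1 p2 (x + 1) (y + 1) : Nat) : Int) := by
          rw [rl_succ, if_neg hc]; simp
        rw [e1, e2, e3, ih (x + 1) (y + 1) _ (by omega)]
        have hz : rl p1 p2 (x + 1) (y + 1) = 0 := by rw [rl_succ, if_neg hc]
        by_cases hg : 1 ≤ rl p1 p2 x y ∧ ml ≤ (rl p1 p2 x y : Int)
        · rw [if_pos (show ((rl p1 p2 x y : Int) > (rl p1 p2 (x + 1) (y + 1) : Int) &&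
              (rl p1 p2 x y : Int) ≥ ml) = true from by
            simp only [Bool.and_eq_true, decide_eq_true_eq]; omega)]
          rw [if_pos hg, entryB_toE, List.append_assoc]
        · rw [if_neg (show ¬ ((rl p1 p2 x y : Int) > (rl p1 p2 (x + 1) (y + 1) : Int) &&
              (rl p1 p2 x y : Int) ≥ ml) = true from by
            simp only [Bool.and_eq_true, decide_eq_true_eq]; omega)]
          rw [if_neg hg]
          simp
    · exact walkB_stop p1 p2 ml x y acc hin

theorem candLoopB_eq (primer1 primer2 : String) (ml : Int) :
    candLoopB primer1 primer2 ml = canB primer1.toList primer2.toList ml := by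
  unfold candLoopB canB
  simp only [strlen_toList]
  rw [PySem.List.pyRange_neg_one, PySem.List.pyRange_one]
  rw [show ((primer1.toList.length : Int) - 1 - (-1)).toNat = primer1.toList.length by omega]
  rw [show ((primer2.toList.length : Int) - 1).toNat = primer2.toList.length - 1 by omega]
  rw [List.map_map, List.map_map, List.foldl_append, List.foldl_map, List.foldl_map]
  rw [PySem.List.foldl_congr_mem (List.range primer1.toList.length) _
    (fun acc k => acc ++ specDiag primer1.toList primer2.toList ml (primer1.toList.length - 1 - k) 0) _
    (by
      intro acc k hk
      rw [List.mem_range] at hk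
      dsimp only [Function.comp]
      rw [show (primer1.toList.length : Int) - 1 - (k : Int) =
        ((primer1.toList.length - 1 - k : Nat) : Int) by omega]
      have h := walkB_eq_specDiag primer1.toList primer2.toList ml primer1.toList.length
        (primer1.toList.length - 1 - k) 0 acc (by omega)
      rw [rl_zero_right] at h
      exact h)]
  rw [PySem.List.foldl_append_eq_flatMap]
  rw [PySem.List.foldl_congr_mem (List.range (primer2.toList.length - 1)) _
    (fun acc t => acc ++ specDiag primer1.toList primer2.toList ml 0 (t + 1)) _
    (by
      intro acc t ht
      rw [List.mem_range] at ht
      dsimp only [Function.comp]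
      rw [show (1 : Int) + (t : Int) = ((t + 1 : Nat) : Int) by push_cast; ring]
      exact walkB_eq_specDiag primer1.toList primer2.toList ml primer1.toList.length
        0 (t + 1) _ (by omega))]
  rw [PySem.List.foldl_append_eq_flatMap]
  simp

theorem rowVals_getD (p1 p2 : List Char) (x : Nat) :
    ∀ t : Nat, (rowVals p1 p2 x).getD t 0 = (rl p1 p2 x t : Int) := by
  intro t
  match t with
  | 0 => simp [rowVals, rl_zero_right]
  | t + 1 =>
    unfold rowVals
    by_cases ht : t < p2.length
    · rw [List.getD_cons_succ]
      rw [List.getD_eq_getElem?_getD, List.getElem?_map, List.getElem?_range ht]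
      rfl
    · rw [List.getD_cons_succ, List.getD_eq_default _ _ (by simpa using ht)]
      rw [rl_big_right (by omega)]
      simp

theorem replicate_eq_rowVals (p1 p2 : List Char) :
    List.replicate (((p2.length : Int) + 1)).toNat 0 = rowVals p1 p2 0 := by
  have h1 : (((p2.length : Int) + 1)).toNat = p2.length + 1 := by omega
  rw [h1]
  unfold rowVals
  rw [List.replicate_succ]
  congr 1
  symm
  rw [List.eq_replicate_iff]
  refine ⟨by simp, ?_⟩
  intro b hb
  rw [List.mem_map] at hb
  obtain ⟨t, _, rfl⟩ := hb
  simp [rl]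

theorem innerFoldA (p1 p2 : List Char) (ml : Int) (a : Nat) (prev : List Int)
    (hprev : ∀ t : Nat, prev.getD t 0 = (rl p1 p2 a t : Int))
    (res0 : List (List (String × Int))) :
    (PySem.List.pyRange 1 ((p2.length : Int) + 1) 1).foldl
      (fun (rs : List Int × List (List (String × Int))) j =>
        if isComplementary (PySem.List.pyGetD p1 ((1 + (a : Int)) - 1) '?')
                           (PySem.List.pyGetD p2 (j - 1) '?') then
          if PySem.List.pyGetD prev (j - 1) 0 + 1 ≥ ml then
            (rs.1 ++ [PySem.List.pyGetD prev (j - 1) 0 + 1],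
             rs.2 ++ [[("Primer1_start", (1 + (a : Int)) - (PySem.List.pyGetD prev (j - 1) 0 + 1)),
                       ("Primer1_end", (1 + (a : Int))),
                       ("Primer2_start", j - (PySem.List.pyGetD prev (j - 1) 0 + 1)),
                       ("Primer2_end", j),
                       ("Length", PySem.List.pyGetD prev (j - 1) 0 + 1)]])
          else (rs.1 ++ [PySem.List.pyGetD prev (j - 1) 0 + 1], rs.2)
        else (rs.1 ++ [(0 : Int)], rs.2))
      ([0], res0)
    = (rowVals p1 p2 (a + 1), res0 ++ rowEmit p1 p2 ml (a + 1)) := by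
  rw [PySem.List.pyRange_one]
  rw [show (((p2.length : Int) + 1) - 1).toNat = p2.length by omega]
  rw [List.foldl_map]
  suffices H : ∀ k : Nat, (List.range k).foldl
      (fun (rs : List Int × List (List (String × Int))) (t : Nat) =>
        if isComplementary (PySem.List.pyGetD p1 ((1 + (a : Int)) - 1) '?')
                           (PySem.List.pyGetD p2 ((1 + (t : Int)) - 1) '?') then
          if PySem.List.pyGetD prev ((1 + (t : Int)) - 1) 0 + 1 ≥ ml then
            (rs.1 ++ [PySem.List.pyGetD prev ((1 + (t : Int)) - 1) 0 + 1],
             rs.2 ++ [[("Primer1_start", (1 + (a : Int)) - (PySem.List.pyGetD prev ((1 + (t : Int)) - 1) 0 + 1)),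
                       ("Primer1_end", (1 + (a : Int))),
                       ("Primer2_start", (1 + (t : Int)) - (PySem.List.pyGetD prev ((1 + (t : Int)) - 1) 0 + 1)),
                       ("Primer2_end", (1 + (t : Int))),
                       ("Length", PySem.List.pyGetD prev ((1 + (t : Int)) - 1) 0 + 1)]])
          else (rs.1 ++ [PySem.List.pyGetD prev ((1 + (t : Int)) - 1) 0 + 1], rs.2)
        else (rs.1 ++ [(0 : Int)], rs.2))
      ([0], res0)
      = (0 :: (List.range k).map (fun t => (rl p1 p2 (a + 1) (t + 1) : Int)),
         res0 ++ (List.range k).filterMap (fun t =>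
           if 1 ≤ rl p1 p2 (a + 1) (t + 1) ∧ ml ≤ (rl p1 p2 (a + 1) (t + 1) : Int)
           then some (toE (a + 1) (t + 1) (rl p1 p2 (a + 1) (t + 1))) else none)) by
    exact H p2.length
  intro k
  induction k with
  | zero => simp
  | succ k ih =>
    rw [List.range_succ, List.foldl_append, ih]
    simp only [List.foldl_cons, List.foldl_nil]
    have hgd1 : PySem.List.pyGetD p1 ((1 + (a : Int)) - 1) '?' = p1.getD a '?' := by
      rw [show (1 + (a : Int)) - 1 = (a : Int) by ring]; simp
    have hgd2 : PySem.List.pyGetD p2 ((1 + (k : Int)) - 1) '?' = p2.getD k '?' := by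
      rw [show (1 + (k : Int)) - 1 = (k : Int) by ring]; simp
    have hgd3 : PySem.List.pyGetD prev ((1 + (k : Int)) - 1) 0 = (rl p1 p2 a k : Int) := by
      rw [show (1 + (k : Int)) - 1 = (k : Int) by ring]
      rw [PySem.List.pyGetD_natCast]
      exact hprev k
    rw [hgd1, hgd2, hgd3]
    by_cases hc : isComplementary (p1.getD a '?') (p2.getD k '?') = true
    · rw [if_pos hc]
      have hrl : rl p1 p2 (a + 1) (k + 1) = rl p1 p2 a k + 1 := by rw [rl_succ, if_pos hc]
      have eD : ((rl p1 p2 a k : Int) + 1) = ((rl p1 p2 (a + 1) (k + 1) : Nat) : Int) := by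
        rw [hrl]; push_cast; ring
      have eA : (1 : Int) + (a : Int) = ((a + 1 : Nat) : Int) := by push_cast; ring
      have eK : (1 : Int) + (k : Int) = ((k + 1 : Nat) : Int) := by push_cast; ring
      rw [eD, eA, eK]
      rw [List.map_append, List.filterMap_append]
      simp only [List.map_cons, List.map_nil, List.filterMap_cons, List.filterMap_nil]
      by_cases hml : ml ≤ ((rl p1 p2 (a + 1) (k + 1) : Nat) : Int)
      · rw [if_pos (show ((rl p1 p2 (a + 1) (k + 1) : Nat) : Int) ≥ ml from hml)]
        rw [if_pos (show 1 ≤ rl p1 p2 (a + 1) (k + 1) ∧ ml ≤ ((rl p1 p2 (a + 1) (k + 1) : Nat) : Int)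
          from ⟨by omega, hml⟩)]
        simp [toE, List.cons_append, List.append_assoc]
      · rw [if_neg (show ¬ (((rl p1 p2 (a + 1) (k + 1) : Nat) : Int) ≥ ml) from hml)]
        rw [if_neg (show ¬ (1 ≤ rl p1 p2 (a + 1) (k + 1) ∧ ml ≤ ((rl p1 p2 (a + 1) (k + 1) : Nat) : Int))
          from fun h => hml h.2)]
        simp [List.cons_append]
    · rw [if_neg hc]
      have hrl : rl p1 p2 (a + 1) (k + 1) = 0 := by rw [rl_succ, if_neg hc]
      rw [List.map_append, List.filterMap_append]
      simp only [List.map_cons, List.map_nil, List.filterMap_cons, List.filterMap_nil, hrl]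
      simp [List.cons_append]

theorem dpLoopA_eq (primer1 primer2 : String) (ml : Int) :
    (dpLoopA primer1 primer2 ml).2 = canA primer1.toList primer2.toList ml := by
  unfold dpLoopA canA
  simp only [strlen_toList]
  rw [PySem.List.pyRange_one 1 ((primer1.toList.length : Int) + 1)]
  rw [show (((primer1.toList.length : Int) + 1) - 1).toNat = primer1.toList.length by omega]
  rw [List.foldl_map]
  suffices H : ∀ K : Nat, (List.range K).foldl
      (fun (st : List Int × List (List (String × Int))) (k : Nat) =>
        (PySem.List.pyRange 1 ((primer2.toList.length : Int) + 1) 1).foldl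
          (fun (rs : List Int × List (List (String × Int))) j =>
            if isComplementary (PySem.List.pyGetD primer1.toList ((1 + (k : Int)) - 1) '?')
                               (PySem.List.pyGetD primer2.toList (j - 1) '?') then
              if PySem.List.pyGetD st.1 (j - 1) 0 + 1 ≥ ml then
                (rs.1 ++ [PySem.List.pyGetD st.1 (j - 1) 0 + 1],
                 rs.2 ++ [[("Primer1_start", (1 + (k : Int)) - (PySem.List.pyGetD st.1 (j - 1) 0 + 1)),
                           ("Primer1_end", (1 + (k : Int))),
                           ("Primer2_start", j - (PySem.List.pyGetD st.1 (j - 1) 0 + 1)),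
                           ("Primer2_end", j),
                           ("Length", PySem.List.pyGetD st.1 (j - 1) 0 + 1)]])
              else (rs.1 ++ [PySem.List.pyGetD st.1 (j - 1) 0 + 1], rs.2)
            else (rs.1 ++ [(0 : Int)], rs.2))
          ([0], st.2))
      (List.replicate (((primer2.toList.length : Int) + 1)).toNat 0, [])
      = (rowVals primer1.toList primer2.toList K,
         (List.range K).flatMap (fun a => rowEmit primer1.toList primer2.toList ml (a + 1))) by
    rw [H primer1.toList.length]
  intro K
  induction K with
  | zero =>
    rw [List.range_zero, List.foldl_nil, replicate_eq_rowVals primer1.toList primer2.toList]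
    simp
  | succ K ih =>
    rw [List.range_succ, List.foldl_append, ih]
    simp only [List.foldl_cons, List.foldl_nil]
    rw [innerFoldA primer1.toList primer2.toList ml K (rowVals primer1.toList primer2.toList K)
      (rowVals_getD primer1.toList primer2.toList K) _]
    rw [List.flatMap_append]
    simp

-- ---------- main equivalence ------------ ---------- main equivalence ------------ ---------- main equivalence ----------

theorem shaped_canA {p1 p2 : List Char} {ml : Int} {e : List (String × Int)}
    (he : e ∈ canA p1 p2 ml) : shaped e := by
  obtain ⟨x, y, _, rfl⟩ := mem_canA.mp he
  exact ⟨_, _, _, rfl⟩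

theorem sub_ext {p1 p2 : List Char} {x y t : Nat}
    (ht2 : rl p1 p2 (x + t) (y + t) = rl p1 p2 x y + t) :
    subRel (toE (x + t) (y + t) (rl p1 p2 (x + t) (y + t))) (toE x y (rl p1 p2 x y)) := by
  unfold subRel
  rw [kp1_toE, kp1_toE, kp3_toE, kp3_toE, ke1_toE, ke1_toE, ke2_toE, ke2_toE, ht2]
  push_cast
  omega

theorem good_iff (p1 p2 : List Char) (ml : Int) (r : List (String × Int)) :
    (r ∈ canA p1 p2 ml ∧ ∀ q ∈ canA p1 p2 ml, q ≠ r → ¬ subRel q r) ↔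
    (r ∈ canB p1 p2 ml ∧ ∀ q ∈ canB p1 p2 ml, q ≠ r → ¬ subRel q r) := by
  constructor
  · rintro ⟨hmem, hnc⟩
    obtain ⟨x, y, hA, rfl⟩ := mem_canA.mp hmem
    have hB : isCandB p1 p2 ml x y := by
      by_contra hnB
      obtain ⟨t, ht1, ht2⟩ := exists_ext p1 p2 ml p1.length x y (by omega) hA.1 hA.2
      have htne : t ≠ 0 := by
        intro h0
        subst h0
        exact hnB (by simpa using ht1)
      refine hnc _ (mem_canA.mpr ⟨x + t, y + t, ht1.1, rfl⟩) ?_ (sub_ext ht2)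
      intro heq
      rw [toE_inj] at heq
      omega
    refine ⟨mem_canB.mpr ⟨x, y, hB, rfl⟩, ?_⟩
    intro q hq hne
    obtain ⟨x', y', hB', rfl⟩ := mem_canB.mp hq
    exact hnc _ (mem_canA.mpr ⟨x', y', hB'.1, rfl⟩) hne
  · rintro ⟨hmem, hnc⟩
    obtain ⟨x, y, hB, rfl⟩ := mem_canB.mp hmem
    refine ⟨mem_canA.mpr ⟨x, y, hB.1, rfl⟩, ?_⟩
    intro q hq hne hsub
    obtain ⟨x', y', hA', rfl⟩ := mem_canA.mp hq
    obtain ⟨t, ht1, ht2⟩ := exists_ext p1 p2 ml p1.length x' y' (by omega) hA'.1 hA'.2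
    have hsub' := sub_ext ht2
    have hne' : toE (x' + t) (y' + t) (rl p1 p2 (x' + t) (y' + t)) ≠ toE x y (rl p1 p2 x y) := by
      by_cases ht0 : t = 0
      · subst ht0; simpa using hne
      · intro heq
        have hk1 : key2lt (toE (x' + t) (y' + t) (rl p1 p2 (x' + t) (y' + t)))
            (toE x' y' (rl p1 p2 x' y')) := by
          refine subRel_key2lt ⟨_, _, _, rfl⟩ ⟨_, _, _, rfl⟩ hsub' ?_
          intro hh
          rw [toE_inj] at hh
          omega
        have hk2 : key2lt (toE x' y' (rl p1 p2 x' y')) (toE x y (rl p1 p2 x y)) :=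
          subRel_key2lt ⟨_, _, _, rfl⟩ ⟨_, _, _, rfl⟩ hsub hne
        rw [heq] at hk1
        exact key3lt_irrefl _ (key3lt_trans (key2lt_key3lt hk1) (key2lt_key3lt hk2))
    exact hnc _ (mem_canB.mpr ⟨x' + t, y' + t, ht1, rfl⟩) hne' (subRel_trans hsub' hsub)

theorem mem_goodFilter {l : List (List (String × Int))} {r : List (String × Int)} :
    r ∈ l.filter (fun r => !(l.any (fun q => (q != r) && subsetOfA q r))) ↔
      r ∈ l ∧ ∀ q ∈ l, q ≠ r → ¬ subRel q r := by
  rw [List.mem_filter]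
  constructor
  · rintro ⟨h1, h2⟩
    refine ⟨h1, ?_⟩
    intro q hq hne hsub
    rw [Bool.not_eq_true', List.any_eq_false] at h2
    have h3 := h2 q hq
    rw [Bool.not_eq_true] at h3
    rw [Bool.and_eq_false_iff] at h3
    rcases h3 with h | h
    · rw [bne_eq_false_iff_eq] at h
      exact hne h
    · rw [← subsetOfA_iff q r] at hsub
      rw [h] at hsub
      exact Bool.false_ne_true hsub
  · rintro ⟨h1, h2⟩
    refine ⟨h1, ?_⟩
    rw [Bool.not_eq_true', List.any_eq_false]
    intro q hq
    rw [Bool.not_eq_true, Bool.and_eq_false_iff]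
    by_cases hqr : q = r
    · left
      rw [bne_eq_false_iff_eq]
      exact hqr
    · right
      cases hx : subsetOfA q r with
      | false => rfl
      | true => exact absurd ((subsetOfA_iff q r).mp hx) (h2 q hq hqr)

theorem main_eq (primer1 primer2 : String) (ml : Int) :
    find_all_complementary_primers primer1 primer2 ml =
    find_all_complementary_primers_alt primer1 primer2 ml := by
  have hA0 : find_all_complementary_primers primer1 primer2 ml =
      filterLoopA (PySem.List.sorted2 (canA primer1.toList primer2.toList ml) kp1 kp2 false) [] := by
    show filterLoopA (PySem.List.sorted2 (dpLoopA primer1 primer2 ml).2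
      (fun x => PySem.Dict.getD ⟨x⟩ "Primer1_start" 0)
      (fun x => -PySem.Dict.getD ⟨x⟩ "Length" 0)) [] = _
    rw [dpLoopA_eq]
    rfl
  have hB0 : find_all_complementary_primers_alt primer1 primer2 ml =
      (PySem.List.sorted2 (canB primer1.toList primer2.toList ml) kp1 kp2 false).filter
        (fun r => !((PySem.List.sorted2 (canB primer1.toList primer2.toList ml) kp1 kp2 false).any
          (fun q => (q != r) && subsetOfA q r))) := by
    show (PySem.List.sorted2 (candLoopB primer1 primer2 ml)
      (fun x => PySem.Dict.getD ⟨x⟩ "Primer1_start" 0)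
      (fun x => -PySem.Dict.getD ⟨x⟩ "Length" 0)).filter
        (fun r => !((PySem.List.sorted2 (candLoopB primer1 primer2 ml)
          (fun x => PySem.Dict.getD ⟨x⟩ "Primer1_start" 0)
          (fun x => -PySem.Dict.getD ⟨x⟩ "Length" 0)).any
          (fun q => (q != r) && containsB q r))) = _
    rw [candLoopB_eq, containsB_eq_subsetOfA]
    rfl
  rw [hA0, hB0]
  have hpermA := PySem.List.sorted2_perm (canA primer1.toList primer2.toList ml) kp1 kp2 false
  have hpermB := PySem.List.sorted2_perm (canB primer1.toList primer2.toList ml) kp1 kp2 false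
  have hpwA := sorted2_strict _ (canA_tie primer1.toList primer2.toList ml)
  have hpwB := sorted2_strict _ (canB_tie primer1.toList primer2.toList ml)
  have hshA : ∀ e ∈ PySem.List.sorted2 (canA primer1.toList primer2.toList ml) kp1 kp2 false, shaped e :=
    fun e he => shaped_canA (hpermA.mem_iff.mp he)
  rw [filterLoopA_spec (PySem.List.sorted2 (canA primer1.toList primer2.toList ml) kp1 kp2 false)
    hpwA hshA (PySem.List.sorted2 (canA primer1.toList primer2.toList ml) kp1 kp2 false) [] rfl]
  refine List.Perm.eq_of_pairwise (le := key3lt) ?_ (List.Pairwise.filter _ hpwA)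
    (List.Pairwise.filter _ hpwB) ?_
  · intro a b _ _ hab hba
    exact absurd hba (key3lt_asymm hab)
  · rw [List.perm_ext_iff_of_nodup
      ((List.Pairwise.filter _ hpwA).imp (fun h => key3lt_ne h))
      ((List.Pairwise.filter _ hpwB).imp (fun h => key3lt_ne h))]
    intro r
    rw [mem_goodFilter, mem_goodFilter]
    constructor
    · rintro ⟨h1, h2⟩
      have hgood := (good_iff primer1.toList primer2.toList ml r).mp
        ⟨hpermA.mem_iff.mp h1, fun q hq => h2 q (hpermA.mem_iff.mpr hq)⟩
      exact ⟨hpermB.mem_iff.mpr hgood.1, fun q hq => hgood.2 q (hpermB.mem_iff.mp hq)⟩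
    · rintro ⟨h1, h2⟩
      have hgood := (good_iff primer1.toList primer2.toList ml r).mpr
        ⟨hpermB.mem_iff.mp h1, fun q hq => h2 q (hpermB.mem_iff.mpr hq)⟩
      exact ⟨hpermA.mem_iff.mpr hgood.1, fun q hq => hgood.2 q (hpermA.mem_iff.mp hq)⟩

-- ===== VERDICT (by name: the statement is the Claim_ definition above) =====
theorem find_all_complementary_primers_spec : Claim_equal_find_all_complementary_primers := by
  intro primer1 primer2 min_len _
  exact main_eq primer1 primer2 min_len
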